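-- pv_equiv track=rewrite | github.com/MarkoO81/brand-protection-scanner | analyzers/domain.py | _typosquats
-- ===== SOURCE A (Python) =====
-- def _typosquats(name: str) -> set[str]:
--     """Generate common keyboard-distance typos."""
--     results: set[str] = set()
--     # Omission
--     for i in range(len(name)):
--         results.add(name[:i] + name[i + 1:])
--     # Repetition
--     for i in range(len(name)):
--         results.add(name[:i] + name[i] + name[i:])
--     # Transposition
--     for i in range(len(name) - 1):
--         results.add(name[:i] + name[i + 1] + name[i] + name[i + 2:])
--     # Replacement with adjacent QWERTY keys
--     qwerty: dict[str, str] = {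
--         "a": "qwsz", "b": "vghn", "c": "xdfv", "d": "ersfcx",
--         "e": "rdsw34", "f": "rtgdcev", "g": "tyhfvb", "h": "yugjbn",
--         "i": "uojk89", "j": "uikhgm", "k": "iojlhn", "l": "opk;",
--         "m": "njk,", "n": "bhjm", "o": "iplk90", "p": "ol;[-0",
--         "q": "wa12", "r": "etdf45", "s": "wedxza", "t": "ryfg56",
--         "u": "yihj78", "v": "cfgb", "w": "qase23", "x": "zsdc",
--         "y": "tugh67", "z": "asx",
--     }
--     for i, ch in enumerate(name):
--         for adj in qwerty.get(ch, ""):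
--             results.add(name[:i] + adj + name[i + 1:])
--     return results - {""}
-- ===== SOURCE B (Python) =====
-- QWERTY = {
--     "a": "qwsz", "b": "vghn", "c": "xdfv", "d": "ersfcx",
--     "e": "rdsw34", "f": "rtgdcev", "g": "tyhfvb", "h": "yugjbn",
--     "i": "uojk89", "j": "uikhgm", "k": "iojlhn", "l": "opk;",
--     "m": "njk,", "n": "bhjm", "o": "iplk90", "p": "ol;[-0",
--     "q": "wa12", "r": "etdf45", "s": "wedxza", "t": "ryfg56",
--     "u": "yihj78", "v": "cfgb", "w": "qase23", "x": "zsdc",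
--     "y": "tugh67", "z": "asx",
-- }
--
--
-- def _typosquats(name: str) -> set[str]:
--     """Generate common keyboard-distance typos (single pass, no index slicing)."""
--     omission, repetition, transposition, replacement = [], [], [], []
--     pre = ""
--     rest = name
--     while rest:
--         ch, tail = rest[0], rest[1:]
--         omission.append(pre + tail)
--         repetition.append(pre + ch + ch + tail)
--         if tail:
--             transposition.append(pre + tail[0] + ch + tail[1:])
--         for adj in QWERTY.get(ch, ""):
--             replacement.append(pre + adj + tail)
--         pre += ch
--         rest = tail
--     results = set(omission + repetition + transposition + replacement)
--     results.discard("")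
--     return results
-- ===== Notes on version B (the rewrite author's own statement) =====
-- stated objective: alternative
-- what changed: A makes four separate index loops over the name, rebuilding each variant with two slices per step; B makes one structural pass carrying an explicit prefix/suffix split (no index arithmetic or slicing), appending the omission, repetition, transposition and QWERTY-replacement variants of each position to per-phase lists that are deduplicated once at the end.
import Mathlib
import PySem

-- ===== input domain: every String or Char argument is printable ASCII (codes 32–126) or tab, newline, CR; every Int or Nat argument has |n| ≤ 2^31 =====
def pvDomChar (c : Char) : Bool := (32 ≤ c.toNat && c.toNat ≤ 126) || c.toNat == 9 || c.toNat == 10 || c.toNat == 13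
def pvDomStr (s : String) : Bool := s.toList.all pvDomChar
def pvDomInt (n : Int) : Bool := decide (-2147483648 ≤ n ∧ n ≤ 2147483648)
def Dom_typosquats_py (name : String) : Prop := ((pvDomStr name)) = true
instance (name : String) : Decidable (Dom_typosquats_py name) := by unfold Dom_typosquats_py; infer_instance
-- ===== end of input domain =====

-- B replaces A's four index-and-slice passes over the name by one structural pass carrying a
-- prefix/suffix split (no slicing), collecting the variants in phase-ordered lists deduplicated once
-- at the end; objective: alternative decomposition (same value, same asymptotic cost).
-- Strings are handled as their character lists (String.ofList ∘ String.toList = id), chars stand for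
-- Python's length-1 strings; both ports do this identically.

-- shared data: the QWERTY adjacency table (a module-level constant of both programs)
def qwertyTable : PySem.Dict Char (List Char) :=
  ⟨[('a', "qwsz".toList), ('b', "vghn".toList), ('c', "xdfv".toList), ('d', "ersfcx".toList),
   ('e', "rdsw34".toList), ('f', "rtgdcev".toList), ('g', "tyhfvb".toList), ('h', "yugjbn".toList),
   ('i', "uojk89".toList), ('j', "uikhgm".toList), ('k', "iojlhn".toList), ('l', "opk;".toList),
   ('m', "njk,".toList), ('n', "bhjm".toList), ('o', "iplk90".toList), ('p', "ol;[-0".toList),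
   ('q', "wa12".toList), ('r', "etdf45".toList), ('s', "wedxza".toList), ('t', "ryfg56".toList),
   ('u', "yihj78".toList), ('v', "cfgb".toList), ('w', "qase23".toList), ('x', "zsdc".toList),
   ('y', "tugh67".toList), ('z', "asx".toList)]⟩

-- ===== PORT A =====
-- A on the character list: four loops over index ranges adding slice-built variants to a set,
-- then `results - {""}`.  name[i] is always in range where A evaluates it, so pyGetD is exact.
def typosAImpl (cs : List Char) : List (List Char) :=
  let n : Int := PySem.List.len cs
  let r1 := (PySem.List.pyRange 0 n 1).foldl (fun s i =>
    PySem.Set.add s (PySem.List.slice cs none (some i) ++ PySem.List.slice cs (some (i+1)) none))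
    PySem.Set.empty
  let r2 := (PySem.List.pyRange 0 n 1).foldl (fun s i =>
    PySem.Set.add s (PySem.List.slice cs none (some i) ++ PySem.List.pyGetD cs i ' ' :: PySem.List.slice cs (some i) none)) r1
  let r3 := (PySem.List.pyRange 0 (n-1) 1).foldl (fun s i =>
    PySem.Set.add s (PySem.List.slice cs none (some i) ++ PySem.List.pyGetD cs (i+1) ' ' :: PySem.List.pyGetD cs i ' ' :: PySem.List.slice cs (some (i+2)) none)) r2
  let r4 := (PySem.List.enumerate cs).foldl (fun s p =>
    (PySem.Dict.getD qwertyTable p.2 []).foldl (fun s adj =>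
      PySem.Set.add s (PySem.List.slice cs none (some p.1) ++ adj :: PySem.List.slice cs (some (p.1+1)) none)) s) r3
  PySem.Set.diff r4 [[]]

def typosquats_py (name : String) : List String :=
  (typosAImpl name.toList).map String.ofList

-- ===== PORT B =====
-- B's while loop: pre/rest split, appending each variant kind to its phase list.
def typosBGo (pre : List Char) : List Char →
    List (List Char) → List (List Char) → List (List Char) → List (List Char) →
    (List (List Char) × List (List Char) × List (List Char) × List (List Char))
  | [], om, rep, tr, repl => (om, rep, tr, repl)
  | ch :: tail, om, rep, tr, repl =>
    typosBGo (pre ++ [ch]) tail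
      (om ++ [pre ++ tail])
      (rep ++ [pre ++ ch :: ch :: tail])
      (match tail with
       | [] => tr
       | t0 :: trest => tr ++ [pre ++ t0 :: ch :: trest])
      (repl ++ (PySem.Dict.getD qwertyTable ch []).map (fun adj => pre ++ adj :: tail))

def typosquats_py_alt (name : String) : List String :=
  match typosBGo [] name.toList [] [] [] [] with
  | (om, rep, tr, repl) =>
    (PySem.Set.discard (PySem.Set.ofList (om ++ rep ++ tr ++ repl)) []).map String.ofList

-- ===== PRECONDITION & SPEC =====
def Spec_typosquats_py (name : String) (out : List String) : Prop := out = typosquats_py_alt name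
instance (name : String) (out : List String) : Decidable (Spec_typosquats_py name out) := by unfold Spec_typosquats_py; infer_instance

-- ===== CLAIM (what is proved, stated in full; the proofs are below) =====
def Claim_equal_typosquats_py : Prop := ∀ (name : String), Dom_typosquats_py name → Spec_typosquats_py name (typosquats_py name)

-- ===== LEMMAS AND PROOFS =====

-- the four phase lists, in A's slice-shaped normal form on the whole character list
def phOm (cs : List Char) (i : Nat) : List Char := cs.take i ++ cs.drop (i+1)
def phRep (cs : List Char) (i : Nat) : List Char := cs.take i ++ cs.getD i ' ' :: cs.drop i
def phTr (cs : List Char) (i : Nat) : List Char :=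
  cs.take i ++ cs.getD (i+1) ' ' :: cs.getD i ' ' :: cs.drop (i+2)
def phRepl (cs : List Char) (i : Nat) : List (List Char) :=
  (PySem.Dict.getD qwertyTable (cs.getD i ' ') []).map (fun adj => cs.take i ++ adj :: cs.drop (i+1))

def streamM (cs : List Char) : List (List Char) :=
  (List.range cs.length).map (phOm cs) ++ (List.range cs.length).map (phRep cs) ++
  (List.range (cs.length - 1)).map (phTr cs) ++ (List.range cs.length).flatMap (phRepl cs)

lemma typosBGo_spec (rest : List Char) : ∀ (pre : List Char) om rep tr repl,
    typosBGo pre rest om rep tr repl =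
      (om ++ (List.range rest.length).map (fun i => pre ++ phOm rest i),
       rep ++ (List.range rest.length).map (fun i => pre ++ phRep rest i),
       tr ++ (List.range (rest.length - 1)).map (fun i => pre ++ phTr rest i),
       repl ++ (List.range rest.length).flatMap (fun i => (phRepl rest i).map (pre ++ ·))) := by
  induction rest with
  | nil => intro pre om rep tr repl; simp [typosBGo]
  | cons ch tail ih =>
    intro pre om rep tr repl
    simp only [typosBGo]
    rw [ih]
    cases tail with
    | nil => simp [phOm, phRep, phTr, phRepl, List.range_succ_eq_map]
    | cons t0 trest =>
      simp [phOm, phRep, phTr, phRepl, List.range_succ_eq_map, List.map_map, Function.comp,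
        List.flatMap_cons, List.append_assoc]
      simp only [List.flatMap_map, Function.comp_def]
      congr 1

-- loop shape: a fold of set-updates is one update by the flattened stream
lemma foldl_update_eq_update_flatMap {β : Type} (l : List β) (h : β → List (List Char))
    (s : PySem.Set (List Char)) :
    l.foldl (fun s x => PySem.Set.update s (h x)) s = PySem.Set.update s (l.flatMap h) := by
  induction l generalizing s with
  | nil => simp [PySem.Set.update]
  | cons x xs ih => simp [PySem.Set.update, List.foldl_append] at *; simp [ih]

lemma update_update (s : PySem.Set (List Char)) (a b : List (List Char)) :
    PySem.Set.update (PySem.Set.update s a) b = PySem.Set.update s (a ++ b) := by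
  simp [PySem.Set.update, List.foldl_append]

lemma typosAImpl_eq (cs : List Char) :
    typosAImpl cs = PySem.Set.diff (PySem.Set.ofList (streamM cs)) [[]] := by
  have hOm : (PySem.List.pyRange 0 (PySem.List.len cs) 1).map
      (fun i => PySem.List.slice cs none (some i) ++ PySem.List.slice cs (some (i+1)) none)
      = (List.range cs.length).map (phOm cs) := by
    rw [PySem.List.pyRange_one]
    rw [List.map_map]
    apply List.map_congr_left
    intro k _
    simp only [Function.comp_apply, zero_add, show ((k:Int)+1) = ((k+1:Nat):Int) from by push_cast; ring,
      PySem.List.slice_to_natCast, PySem.List.slice_from_natCast, phOm]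
  have hRep : (PySem.List.pyRange 0 (PySem.List.len cs) 1).map
      (fun i => PySem.List.slice cs none (some i) ++ PySem.List.pyGetD cs i ' ' :: PySem.List.slice cs (some i) none)
      = (List.range cs.length).map (phRep cs) := by
    rw [PySem.List.pyRange_one, List.map_map]
    apply List.map_congr_left
    intro k _
    simp only [Function.comp_apply, zero_add, PySem.List.slice_to_natCast, PySem.List.slice_from_natCast,
      PySem.List.pyGetD_natCast, phRep]
  have hTr : (PySem.List.pyRange 0 (PySem.List.len cs - 1) 1).map
      (fun i => PySem.List.slice cs none (some i) ++ PySem.List.pyGetD cs (i+1) ' ' :: PySem.List.pyGetD cs i ' ' :: PySem.List.slice cs (some (i+2)) none)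
      = (List.range (cs.length - 1)).map (phTr cs) := by
    rw [PySem.List.pyRange_one, List.map_map]
    have hn : ((PySem.List.len cs - 1) - 0).toNat = cs.length - 1 := by
      simp only [PySem.List.len_eq, Int.sub_zero]
      omega
    rw [hn]
    apply List.map_congr_left
    intro k _
    simp only [Function.comp_apply, zero_add, show ((k:Int)+1) = ((k+1:Nat):Int) from by push_cast; ring,
      show ((k:Int)+2) = ((k+2:Nat):Int) from by push_cast; ring,
      PySem.List.slice_to_natCast, PySem.List.slice_from_natCast,
      PySem.List.pyGetD_natCast, phTr]
  have hRepl : (PySem.List.enumerate cs).flatMap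
      (fun p => (PySem.Dict.getD qwertyTable p.2 []).map
        (fun adj => PySem.List.slice cs none (some p.1) ++ adj :: PySem.List.slice cs (some (p.1+1)) none))
      = (List.range cs.length).flatMap (phRepl cs) := by
    rw [PySem.List.enumerate_eq_map_pyRange cs ' ', PySem.List.pyRange_one, List.map_map,
      List.flatMap_map]
    apply List.flatMap_congr
    intro k _
    simp only [Function.comp_apply, zero_add, show ((k:Int)+1) = ((k+1:Nat):Int) from by push_cast; ring,
      PySem.List.slice_to_natCast, PySem.List.slice_from_natCast,
      PySem.List.pyGetD_natCast, phRepl]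
  unfold typosAImpl
  simp only [← PySem.Set.update_map_eq_foldl_add]
  rw [foldl_update_eq_update_flatMap]
  rw [hOm, hRep, hTr, hRepl]
  rw [update_update, update_update, update_update]
  rw [show PySem.Set.empty = ([] : PySem.Set (List Char)) from rfl, PySem.Set.update_nil_left]
  unfold streamM
  simp [List.append_assoc]

lemma typosB_eq (cs : List Char) :
    typosBGo [] cs [] [] [] [] =
      ((List.range cs.length).map (phOm cs), (List.range cs.length).map (phRep cs),
       (List.range (cs.length - 1)).map (phTr cs), (List.range cs.length).flatMap (phRepl cs)) := by
  rw [typosBGo_spec]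
  simp

lemma diff_singleton_eq_discard (s : PySem.Set (List Char)) (x : List Char) :
    PySem.Set.diff s [x] = PySem.Set.discard s x := by
  simp [PySem.Set.diff, PySem.Set.discard]
  exact List.filter_congr (fun y _ => by cases h : y == x <;> simp_all)

-- ===== VERDICT (by name: the statement is the Claim_ definition above) =====
theorem typosquats_py_spec : Claim_equal_typosquats_py := by
  intro name _
  unfold Spec_typosquats_py typosquats_py typosquats_py_alt
  rw [typosB_eq, typosAImpl_eq, diff_singleton_eq_discard]
  rfl
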